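-- pv_equiv track=rewrite | github.com/clemaitre58/test_data_hit | test_integrite.py | rearrange_data
-- ===== SOURCE A (Python) =====
-- def rearrange_data(l_data) :
--     l_s1 = []
--     l_s2 = []
--     l_s3 = []
--     l_s4 = []
--
--     for i in range(len(l_data)) :
--         if l_data[i][0] == 0 :
--             l_s1.append(l_data[i][1])
--         elif l_data[i][0] == 1 :
--             l_s2.append(l_data[i][1])
--         elif l_data[i][0] == 2 :
--             l_s3.append(l_data[i][1])
--         elif l_data[i][0] == 3 :
--             l_s4.append(l_data[i][1])
--
--     return [l_s1, l_s2, l_s3, l_s4]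
-- ===== SOURCE B (Python) =====
-- def rearrange_data(l_data):
--     return [[item[1] for item in l_data if item[0] == k] for k in (0, 1, 2, 3)]
-- ===== Notes on version B (the rewrite author's own statement) =====
-- stated objective: idiomatic
-- what changed: Replaces the single index-based loop branching into four accumulator lists by four independent filtering passes (one comprehension per key 0..3), eliminating the mutable accumulators and the elif chain.
import Mathlib
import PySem

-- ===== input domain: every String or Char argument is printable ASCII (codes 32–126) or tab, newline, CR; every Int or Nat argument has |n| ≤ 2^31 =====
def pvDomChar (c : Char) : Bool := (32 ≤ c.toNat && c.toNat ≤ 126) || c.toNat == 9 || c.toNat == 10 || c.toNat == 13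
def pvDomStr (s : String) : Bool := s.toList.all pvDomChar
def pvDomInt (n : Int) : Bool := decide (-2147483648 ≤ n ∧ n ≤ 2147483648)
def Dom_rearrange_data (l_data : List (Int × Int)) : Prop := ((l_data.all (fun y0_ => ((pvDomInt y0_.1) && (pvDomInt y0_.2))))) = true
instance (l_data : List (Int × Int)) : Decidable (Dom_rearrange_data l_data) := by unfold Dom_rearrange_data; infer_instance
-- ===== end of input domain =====

-- B replaces A's single branching loop with four independent filtering passes (idiomatic; same O(n) cost).
-- ===== PORT A =====
-- A: one loop over indices, appending l_data[i][1] to one of four accumulator lists by an elif chain on l_data[i][0].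
def rearrange_data_loop (l_data : List (Int × Int)) (s1 s2 s3 s4 : List Int) : List (List Int) :=
  match l_data with
  | [] => [s1, s2, s3, s4]
  | x :: rest =>
    if x.1 == 0 then rearrange_data_loop rest (s1 ++ [x.2]) s2 s3 s4
    else if x.1 == 1 then rearrange_data_loop rest s1 (s2 ++ [x.2]) s3 s4
    else if x.1 == 2 then rearrange_data_loop rest s1 s2 (s3 ++ [x.2]) s4
    else if x.1 == 3 then rearrange_data_loop rest s1 s2 s3 (s4 ++ [x.2])
    else rearrange_data_loop rest s1 s2 s3 s4

def rearrange_data (l_data : List (Int × Int)) : List (List Int) :=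
  rearrange_data_loop l_data [] [] [] []

-- ===== PORT B =====
-- B: four filtered comprehensions, one per key k = 0,1,2,3.
def rearrange_data_alt (l_data : List (Int × Int)) : List (List Int) :=
  [0, 1, 2, 3].map (fun k => (l_data.filter (fun item => item.1 == k)).map (fun item => item.2))

-- ===== PRECONDITION & SPEC =====
def Spec_rearrange_data (l_data : List (Int × Int)) (out : List (List Int)) : Prop := out = rearrange_data_alt l_data
instance (l_data : List (Int × Int)) (out : List (List Int)) : Decidable (Spec_rearrange_data l_data out) := by unfold Spec_rearrange_data; infer_instance

-- ===== CLAIM (what is proved, stated in full; the proofs are below) =====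
def Claim_equal_rearrange_data : Prop := ∀ (l_data : List (Int × Int)), Dom_rearrange_data l_data → Spec_rearrange_data l_data (rearrange_data l_data)

-- ===== LEMMAS AND PROOFS =====
def pvBucket (k : Int) (l : List (Int × Int)) : List Int :=
  (l.filter (fun item => item.1 == k)).map (fun item => item.2)

theorem rearrange_data_loop_eq (l : List (Int × Int)) (s1 s2 s3 s4 : List Int) :
    rearrange_data_loop l s1 s2 s3 s4 =
      [s1 ++ pvBucket 0 l, s2 ++ pvBucket 1 l, s3 ++ pvBucket 2 l, s4 ++ pvBucket 3 l] := by
  induction l generalizing s1 s2 s3 s4 with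
  | nil => simp [rearrange_data_loop, pvBucket]
  | cons x rest ih =>
    simp only [rearrange_data_loop]
    split_ifs with h0 h1 h2 h3 <;>
      simp_all [pvBucket]

-- ===== VERDICT (by name: the statement is the Claim_ definition above) =====
theorem rearrange_data_spec : Claim_equal_rearrange_data := by
  intro l _
  unfold Spec_rearrange_data rearrange_data rearrange_data_alt
  simp [rearrange_data_loop_eq, pvBucket]
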